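-- pv_equiv track=rewrite | github.com/bewajafarwah/aoc | 2021/d81.py | uncommon
-- ===== SOURCE A (Python) =====
-- def common(a, b):
--     c = ''
--     for valuea in a:
--         for valueb in b:
--             if valuea == valueb:
--                 if valuea not in c:
--                     c += valuea
--     return c
--
-- def uncommon(a, b):
--     c = common(a, b)
--
--     r = ''
--     for valuea in a:
--         if valuea not in c:
--             r += valuea
--
--     for valueb in b:
--         if valueb not in c:
--             r += valueb
--
--     return r
-- ===== SOURCE B (Python) =====
-- def uncommon(a, b):
--     return ''.join(ch for ch in a if ch not in b) + ''.join(ch for ch in b if ch not in a)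
-- ===== Notes on version B (the rewrite author's own statement) =====
-- stated objective: faster
-- what changed: Drops the quadratic 'common' intersection helper and the membership tests against it; filters each string directly against the other string in one pass each.
import Mathlib
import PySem

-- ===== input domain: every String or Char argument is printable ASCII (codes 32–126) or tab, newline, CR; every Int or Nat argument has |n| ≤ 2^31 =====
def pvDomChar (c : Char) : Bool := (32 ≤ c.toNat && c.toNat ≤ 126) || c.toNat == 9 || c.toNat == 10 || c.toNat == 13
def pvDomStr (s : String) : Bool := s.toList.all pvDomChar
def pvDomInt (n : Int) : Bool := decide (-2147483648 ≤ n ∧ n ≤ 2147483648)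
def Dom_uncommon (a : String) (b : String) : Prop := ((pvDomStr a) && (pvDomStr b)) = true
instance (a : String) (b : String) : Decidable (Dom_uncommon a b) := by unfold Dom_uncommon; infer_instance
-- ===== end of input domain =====

-- B replaces A's quadratic 'common' helper by filtering each string directly against the
-- other (objective: faster by dropping the intersection construction; return value only).

-- ===== PORT A =====
-- 'for valueb in b: if valuea == valueb: if valuea not in c: c += valuea' (inner loop of common)
def commonInner (x : Char) (c : List Char) (bs : List Char) : List Char :=
  bs.foldl (fun c y => if x = y then (if x ∈ c then c else c ++ [x]) else c) c

-- helper 'common(a, b)' of A, over the character lists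
def commonF (as bs : List Char) : List Char :=
  as.foldl (fun c x => commonInner x c bs) []

def uncommon (a : String) (b : String) : String :=
  let c := commonF a.toList b.toList
  let r := a.toList.foldl (fun r x => if x ∈ c then r else r ++ [x]) []
  let r := b.toList.foldl (fun r y => if y ∈ c then r else r ++ [y]) r
  String.mk r

-- ===== PORT B =====
def uncommon_alt (a : String) (b : String) : String :=
  String.mk (a.toList.filter (fun x => !(b.toList.contains x))
             ++ b.toList.filter (fun y => !(a.toList.contains y)))

-- ===== PRECONDITION & SPEC =====
def Spec_uncommon (a : String) (b : String) (out : String) : Prop := out = uncommon_alt a b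
instance (a : String) (b : String) (out : String) : Decidable (Spec_uncommon a b out) := by unfold Spec_uncommon; infer_instance

-- ===== CLAIM (what is proved, stated in full; the proofs are below) =====
def Claim_equal_uncommon : Prop := ∀ (a : String) (b : String), Dom_uncommon a b → Spec_uncommon a b (uncommon a b)

-- ===== LEMMAS AND PROOFS =====

theorem mem_commonInner (x z : Char) (c : List Char) (bs : List Char) :
    z ∈ commonInner x c bs ↔ z ∈ c ∨ (z = x ∧ x ∈ bs) := by
  induction bs generalizing c with
  | nil => simp [commonInner]
  | cons y ys ih =>
    simp only [commonInner] at *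
    simp only [List.foldl_cons]
    by_cases hxy : x = y
    · subst hxy
      by_cases hxc : x ∈ c
      · rw [if_pos rfl, if_pos hxc, ih]
        constructor
        · rintro (h | ⟨rfl, h⟩)
          · exact Or.inl h
          · exact Or.inr ⟨rfl, List.mem_cons_of_mem _ h⟩
        · rintro (h | ⟨rfl, _⟩)
          · exact Or.inl h
          · exact Or.inl hxc
      · rw [if_pos rfl, if_neg hxc, ih]
        simp only [List.mem_append, List.mem_cons, List.not_mem_nil, or_false]
        tauto
    · rw [if_neg hxy, ih]
      simp only [List.mem_cons]
      constructor
      · rintro (h | ⟨rfl, h⟩)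
        · exact Or.inl h
        · exact Or.inr ⟨rfl, Or.inr h⟩
      · rintro (h | ⟨rfl, (h | h)⟩)
        · exact Or.inl h
        · exact absurd h hxy
        · exact Or.inr ⟨rfl, h⟩

theorem mem_commonF_aux (z : Char) (as bs c : List Char) :
    z ∈ as.foldl (fun c x => commonInner x c bs) c ↔ z ∈ c ∨ (z ∈ as ∧ z ∈ bs) := by
  induction as generalizing c with
  | nil => simp
  | cons x xs ih =>
    simp only [List.foldl_cons, ih, mem_commonInner, List.mem_cons]
    constructor
    · rintro ((h | ⟨rfl, h⟩) | ⟨h1, h2⟩)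
      · exact Or.inl h
      · exact Or.inr ⟨Or.inl rfl, h⟩
      · exact Or.inr ⟨Or.inr h1, h2⟩
    · rintro (h | ⟨(rfl | h1), h2⟩)
      · exact Or.inl (Or.inl h)
      · exact Or.inl (Or.inr ⟨rfl, h2⟩)
      · exact Or.inr ⟨h1, h2⟩

theorem mem_commonF (z : Char) (as bs : List Char) :
    z ∈ commonF as bs ↔ z ∈ as ∧ z ∈ bs := by
  simp [commonF, mem_commonF_aux]

theorem foldl_append_filter (c l r : List Char) :
    l.foldl (fun r x => if x ∈ c then r else r ++ [x]) r
      = r ++ l.filter (fun x => !(c.contains x)) := by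
  induction l generalizing r with
  | nil => simp
  | cons x xs ih =>
    by_cases h : x ∈ c <;> simp [h, ih]

theorem uncommon_spec_aux (a b : String) : uncommon a b = uncommon_alt a b := by
  show String.mk _ = String.mk _
  rw [foldl_append_filter, foldl_append_filter]
  simp only [List.nil_append]
  congr 1
  congr 1
  · apply List.filter_congr
    intro x hx
    simp [mem_commonF, hx]
  · apply List.filter_congr
    intro y hy
    simp [mem_commonF, hy]

-- ===== VERDICT (by name: the statement is the Claim_ definition above) =====
theorem uncommon_spec : Claim_equal_uncommon := by
  intro a b _
  exact uncommon_spec_aux a b
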